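-- pv_equiv track=rewrite | github.com/daniel-reich/turbo-robot | APNhiaMCuRSwALN63_12.py | almost_palindrome
-- ===== SOURCE A (Python) =====
-- def almost_palindrome(txt):
--   count=0
--   t = txt[::-1]
--   if txt==t:
--     return False
--   else:
--     for z,s in zip(t,txt):
--       if z!=s:
--         count+=1
--       if count>2:
--         return False
--   return True
-- ===== SOURCE B (Python) =====
-- def almost_palindrome(txt):
--     n = len(txt)
--     count = 0
--     for i in range(n // 2):
--         if txt[i] != txt[n - 1 - i]:
--             count += 1
--     return count == 1
-- ===== Notes on version B (the rewrite author's own statement) =====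
-- stated objective: simpler
-- what changed: Instead of reversing the string, comparing it for the palindrome case and then re-scanning all n doubled positions of zip(reversed, txt) with an early-exit counter, B makes a single half-length pass comparing txt[i] with its mirror txt[n-1-i] and returns whether exactly one pair mismatches.
import Mathlib
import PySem

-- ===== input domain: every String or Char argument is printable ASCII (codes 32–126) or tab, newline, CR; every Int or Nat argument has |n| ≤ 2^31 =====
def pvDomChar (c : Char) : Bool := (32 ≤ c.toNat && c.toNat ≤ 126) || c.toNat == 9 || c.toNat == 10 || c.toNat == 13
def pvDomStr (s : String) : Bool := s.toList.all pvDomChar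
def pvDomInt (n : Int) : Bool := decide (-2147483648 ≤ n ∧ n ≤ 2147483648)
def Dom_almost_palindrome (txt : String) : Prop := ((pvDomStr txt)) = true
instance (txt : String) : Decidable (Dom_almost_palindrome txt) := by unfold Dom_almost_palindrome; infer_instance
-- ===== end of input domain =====

-- B replaces A's reverse-compare-then-rescan with a single half-length mirror pass counting mismatched pairs (return count == 1).

-- ===== PORT A =====
-- the 'for z,s in zip(t,txt)' loop with its counter and early 'return False' when count > 2
def apLoop : List (Char × Char) → Nat → Bool
  | [], _ => true
  | (z, s) :: rest, count =>
    let count := if z ≠ s then count + 1 else count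
    if count > 2 then false else apLoop rest count

def almost_palindrome (txt : String) : Bool :=
  let l := txt.toList
  let t := (PySem.List.slice? l none none (-1)).getD []   -- t = txt[::-1] (step -1 never raises)
  if l = t then false
  else apLoop (t.zip l) 0

-- ===== PORT B =====
def almost_palindrome_alt (txt : String) : Bool :=
  let l := txt.toList
  let n : Int := PySem.Str.len txt
  let count : Int := (PySem.List.pyRange 0 (PySem.Int.floordiv n 2) 1).foldl
      (fun acc i => if PySem.List.pyGet? l i ≠ PySem.List.pyGet? l (n - 1 - i) then acc + 1 else acc) 0
  count == 1

-- ===== PRECONDITION & SPEC =====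
def Spec_almost_palindrome (txt : String) (out : Bool) : Prop := out = almost_palindrome_alt txt
instance (txt : String) (out : Bool) : Decidable (Spec_almost_palindrome txt out) := by unfold Spec_almost_palindrome; infer_instance

-- ===== CLAIM (what is proved, stated in full; the proofs are below) =====
def Claim_equal_almost_palindrome : Prop := ∀ (txt : String), Dom_almost_palindrome txt → Spec_almost_palindrome txt (almost_palindrome txt)

-- ===== LEMMAS AND PROOFS =====

-- mismatch of position i with its mirror, and the count of mismatches among the first k positions
def mism (l : List Char) (i : Nat) : Bool := decide (l.getD i 'a' ≠ l.getD (l.length - 1 - i) 'a')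

def cnt (l : List Char) (k : Nat) : Nat := (List.range k).countP (mism l)

lemma apLoop_eq (ps : List (Char × Char)) (c : Nat) (hc : c ≤ 2) :
    apLoop ps c = decide (c + ps.countP (fun p => decide (p.1 ≠ p.2)) ≤ 2) := by
  induction ps generalizing c with
  | nil => simp [apLoop, hc]
  | cons p rest ih =>
    obtain ⟨z, s⟩ := p
    show (if (if z ≠ s then c + 1 else c) > 2 then false
          else apLoop rest (if z ≠ s then c + 1 else c)) = _
    by_cases hzs : z = s
    · have hcount : List.countP (fun p : Char × Char => decide (p.1 ≠ p.2)) ((z, s) :: rest)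
          = List.countP (fun p : Char × Char => decide (p.1 ≠ p.2)) rest := by
        simp [hzs]
      rw [hcount, show (if z ≠ s then c + 1 else c) = c from if_neg (fun h => h hzs),
        if_neg (by omega : ¬ c > 2), ih c hc]
    · have hcount : List.countP (fun p : Char × Char => decide (p.1 ≠ p.2)) ((z, s) :: rest)
          = List.countP (fun p : Char × Char => decide (p.1 ≠ p.2)) rest + 1 := by
        simp [hzs]
      rw [hcount, show (if z ≠ s then c + 1 else c) = c + 1 from if_pos hzs]
      by_cases h3 : c + 1 > 2
      · rw [if_pos h3]
        symm
        rw [decide_eq_false_iff_not]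
        omega
      · rw [if_neg h3, ih (c + 1) (by omega)]
        simp only [decide_eq_decide]
        omega

lemma zip_rev_eq_map (l : List Char) :
    l.reverse.zip l =
      (List.range l.length).map (fun i => (l.getD (l.length - 1 - i) 'a', l.getD i 'a')) := by
  apply List.ext_getElem
  · simp
  · intro i h1 h2
    have hi : i < l.length := by simpa using h2
    have hrev : l.length - 1 - i < l.length := by omega
    rw [List.getElem_zip, List.getElem_map, List.getElem_range,
      List.getElem_reverse, List.getD_eq_getElem _ _ hi, List.getD_eq_getElem _ _ hrev]

lemma countP_zip_eq_cnt (l : List Char) :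
    (l.reverse.zip l).countP (fun p => decide (p.1 ≠ p.2)) = cnt l l.length := by
  rw [zip_rev_eq_map, List.countP_map, cnt]
  apply List.countP_congr
  intro i _
  simp only [Function.comp, mism, decide_eq_true_eq]
  exact ne_comm

lemma cnt_eq_sum (l : List Char) (k : Nat) :
    cnt l k = ∑ i ∈ Finset.range k, (if mism l i then 1 else 0) := by
  induction k with
  | zero => simp [cnt]
  | succ k ih =>
    rw [cnt, List.range_succ, List.countP_append, ← cnt, ih, Finset.sum_range_succ]
    simp [List.countP_cons]

lemma mism_symm (l : List Char) (i : Nat) (hi : i < l.length) :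
    mism l (l.length - 1 - i) = mism l i := by
  unfold mism
  have h : l.length - 1 - (l.length - 1 - i) = i := by omega
  rw [h]
  simp only [decide_eq_decide]
  exact ne_comm

lemma mism_mid (l : List Char) (i : Nat) (hmid : l.length - 1 - i = i) :
    mism l i = false := by
  simp [mism, hmid]

lemma cnt_full_eq_two_half (l : List Char) :
    cnt l l.length = 2 * cnt l (l.length / 2) := by
  set n := l.length with hn
  set h := n / 2 with hh
  have key : ∀ i < n,
      (if mism l i then (1 : ℕ) else 0) =
        (if i < h then (if mism l i then 1 else 0) else 0) +
        (if n - 1 - i < h then (if mism l (n - 1 - i) then 1 else 0) else 0) := by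
    intro i hi
    by_cases h1 : i < h
    · have h2 : ¬ (n - 1 - i < h) := by omega
      simp [h1, h2]
    · by_cases h2 : n - 1 - i < h
      · rw [mism_symm l i hi]
        simp [h1, h2]
      · have hmid : n - 1 - i = i := by omega
        rw [mism_mid l i hmid]
        simp [h1, h2]
  have hsub : Finset.range h ⊆ Finset.range n := by
    intro x hx
    simp only [Finset.mem_range] at hx ⊢
    omega
  have hd : ∑ i ∈ Finset.range n, (if i < h then (if mism l i then (1 : ℕ) else 0) else 0)
      = cnt l h := by
    rw [cnt_eq_sum]
    rw [← Finset.sum_subset hsub]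
    · apply Finset.sum_congr rfl
      intro i hi
      have : i < h := Finset.mem_range.mp hi
      simp [this]
    · intro i _ hi
      have : ¬ i < h := fun hlt => hi (Finset.mem_range.mpr hlt)
      simp [this]
  calc cnt l n = ∑ i ∈ Finset.range n, (if mism l i then 1 else 0) := cnt_eq_sum l n
    _ = ∑ i ∈ Finset.range n,
          ((if i < h then (if mism l i then 1 else 0) else 0) +
           (if n - 1 - i < h then (if mism l (n - 1 - i) then 1 else 0) else 0)) := by
          apply Finset.sum_congr rfl
          intro i hi
          exact key i (Finset.mem_range.mp hi)
    _ = (∑ i ∈ Finset.range n, (if i < h then (if mism l i then 1 else 0) else 0)) +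
        (∑ i ∈ Finset.range n, (if n - 1 - i < h then (if mism l (n - 1 - i) then 1 else 0) else 0)) :=
          Finset.sum_add_distrib
    _ = cnt l h + cnt l h := by
          rw [hd, Finset.sum_range_reflect
            (fun i => if i < h then (if mism l i then (1 : ℕ) else 0) else 0) n, hd]
    _ = 2 * cnt l h := by omega

lemma reverse_eq_iff_cnt_zero (l : List Char) :
    l.reverse = l ↔ cnt l l.length = 0 := by
  constructor
  · intro hrev
    rw [cnt, List.countP_eq_zero]
    intro i hi
    have hi' : i < l.length := List.mem_range.mp hi
    have hq : l[l.length - 1 - i]? = l[i]? := by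
      rw [← List.getElem?_reverse hi', hrev]
    simp only [mism, List.getD_eq_getElem?_getD, hq, ne_eq, not_true_eq_false, decide_false]
    simp
  · intro hc
    have hall := List.countP_eq_zero.mp (by rw [cnt] at hc; exact hc)
    apply List.ext_getElem?
    intro i
    by_cases hi : i < l.length
    · have h2 : l.length - 1 - i < l.length := by omega
      have hm : l.getD i 'a' = l.getD (l.length - 1 - i) 'a' := by
        simpa [mism] using hall i (List.mem_range.mpr hi)
      rw [List.getD_eq_getElem _ _ hi, List.getD_eq_getElem _ _ h2] at hm
      rw [List.getElem?_reverse hi, List.getElem?_eq_getElem h2, List.getElem?_eq_getElem hi, hm]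
    · have h1 : l.length ≤ i := by omega
      rw [List.getElem?_eq_none (by simpa using h1), List.getElem?_eq_none h1]

lemma alt_core (l : List Char) :
    ((PySem.List.pyRange 0 (PySem.Int.floordiv ((l.length : Int)) 2) 1).foldl
      (fun acc i => if PySem.List.pyGet? l i ≠
          PySem.List.pyGet? l ((l.length : Int) - 1 - i) then acc + 1 else acc)
      (0 : Int) == 1) = decide (cnt l (l.length / 2) = 1) := by
  have hdiv : PySem.Int.floordiv ((l.length : Int)) 2 = ((l.length / 2 : Nat) : Int) := by
    exact_mod_cast PySem.Int.floordiv_natCast l.length 2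
  rw [hdiv]
  rw [PySem.List.foldl_ite_add_one
    (p := fun i => PySem.List.pyGet? l i ≠ PySem.List.pyGet? l ((l.length : Int) - 1 - i))]
  rw [PySem.List.pyRange_one]
  have h0 : (((l.length / 2 : Nat) : Int) - 0).toNat = l.length / 2 := by omega
  rw [h0, List.countP_map]
  have hcongr : (List.range (l.length / 2)).countP
      ((fun i => decide (PySem.List.pyGet? l i ≠ PySem.List.pyGet? l ((l.length : Int) - 1 - i))) ∘
        (fun k : Nat => (0 : Int) + (k : Int)))
      = cnt l (l.length / 2) := by
    apply List.countP_congr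
    intro k hk
    have hk' : k < l.length / 2 := List.mem_range.mp hk
    have hkn : k < l.length := by omega
    have hm : l.length - 1 - k < l.length := by omega
    have e1 : (0 : Int) + (k : Int) = ((k : Nat) : Int) := by omega
    have e2 : ((l.length : Int)) - 1 - ((k : Nat) : Int) = ((l.length - 1 - k : Nat) : Int) := by
      omega
    simp only [Function.comp, e1, e2, PySem.List.pyGet?_natCast, mism]
    rw [List.getElem?_eq_getElem hkn, List.getElem?_eq_getElem hm,
      List.getD_eq_getElem _ _ hkn, List.getD_eq_getElem _ _ hm]
    simp
  rw [hcongr]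
  rw [beq_eq_decide]
  simp only [decide_eq_decide]
  omega

lemma alt_eq (txt : String) :
    almost_palindrome_alt txt = decide (cnt txt.toList (txt.toList.length / 2) = 1) := by
  unfold almost_palindrome_alt
  show ((PySem.List.pyRange 0 (PySem.Int.floordiv (PySem.Str.len txt) 2) 1).foldl
      (fun acc i => if PySem.List.pyGet? txt.toList i ≠
          PySem.List.pyGet? txt.toList (PySem.Str.len txt - 1 - i) then acc + 1 else acc)
      (0 : Int) == 1) = _
  simp only [PySem.Str.len_eq]
  exact alt_core txt.toList

lemma a_eq (txt : String) :
    almost_palindrome txt =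
      if txt.toList.reverse = txt.toList then false
      else decide (cnt txt.toList txt.toList.length ≤ 2) := by
  unfold almost_palindrome
  show (if txt.toList = (PySem.List.slice? txt.toList none none (-1)).getD [] then false
        else apLoop (((PySem.List.slice? txt.toList none none (-1)).getD []).zip txt.toList) 0) = _
  rw [PySem.List.slice?_none_none_neg_one]
  simp only [Option.getD_some]
  by_cases hp : txt.toList.reverse = txt.toList
  · rw [if_pos hp.symm, if_pos hp]
  · rw [if_neg (fun h => hp h.symm), if_neg hp,
      apLoop_eq _ 0 (by omega), countP_zip_eq_cnt]
    simp

-- ===== VERDICT (by name: the statement is the Claim_ definition above) =====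
theorem almost_palindrome_spec : Claim_equal_almost_palindrome := by
  intro txt _
  unfold Spec_almost_palindrome
  rw [a_eq, alt_eq]
  set l := txt.toList
  have hdouble := cnt_full_eq_two_half l
  by_cases hp : l.reverse = l
  · rw [if_pos hp]
    have h0 : cnt l l.length = 0 := (reverse_eq_iff_cnt_zero l).mp hp
    have hz : cnt l (l.length / 2) = 0 := by omega
    simp [hz]
  · rw [if_neg hp]
    have h0 : cnt l l.length ≠ 0 := fun h => hp ((reverse_eq_iff_cnt_zero l).mpr h)
    simp only [decide_eq_decide]
    omega
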